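-- pv_equiv track=rewrite | github.com/pypi-data/pypi-mirror-299 | packages/Bhaskara/Bhaskara-4.1.6.4.6-py3-none-any.whl/Bhaskara/StringAlgorithm/TokenizeVariableDefinition.py | tokenize_defining_variable
-- ===== SOURCE A (Python) =====
-- def tokenize_defining_variable(line,self=None) :
-- 	data_type = ""
-- 	name = ""
-- 	value  = ""
-- 	found_eq = False
-- 	for char in line :
-- 		if not data_type in ['int','chars','float'] :
-- 			if char == " " :
-- 				continue
-- 			data_type += char
-- 			continue
-- 		if char == '=' :
-- 			found_eq = True
-- 			continue
-- 		if found_eq :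
-- 			value += char
-- 			continue
-- 		if char != ' ' :
-- 			name += char
-- 	return data_type,name,value
-- ===== SOURCE B (Python) =====
-- def tokenize_defining_variable(line, self=None):
--     # Phase 1: find where the accumulated non-space prefix first spells a
--     # known type keyword; everything from there on is the declaration.
--     data_type = ""
--     i = len(line)
--     for j, ch in enumerate(line):
--         if data_type in ('int', 'chars', 'float'):
--             i = j
--             break
--         if ch != ' ':
--             data_type += ch
--     # Phase 2: the declaration is "name = value", split on the first '='.
--     name, _, value = line[i:].partition('=')
--     return data_type, name.replace(' ', ''), value
-- ===== Notes on version B (the rewrite author's own statement) =====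
-- stated objective: simpler
-- what changed: Replaces A's single stateful per-char loop (found_eq flag, four branches) by a two-phase decomposition: consume the type keyword, then split the remaining declaration on the first '=' with str.partition.
-- intended difference: On lines whose declaration part after the recognised type keyword contains a second equals sign after the first, A silently deletes every equals sign from the value while B returns the text after the first equals sign verbatim, the intended reading of the equals sign as a single assignment delimiter. — e.g. on tokenize_defining_variable("int a=b=c", none): A returns ("int", "a", "bc"), B returns ("int", "a", "b=c")
import Mathlib
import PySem

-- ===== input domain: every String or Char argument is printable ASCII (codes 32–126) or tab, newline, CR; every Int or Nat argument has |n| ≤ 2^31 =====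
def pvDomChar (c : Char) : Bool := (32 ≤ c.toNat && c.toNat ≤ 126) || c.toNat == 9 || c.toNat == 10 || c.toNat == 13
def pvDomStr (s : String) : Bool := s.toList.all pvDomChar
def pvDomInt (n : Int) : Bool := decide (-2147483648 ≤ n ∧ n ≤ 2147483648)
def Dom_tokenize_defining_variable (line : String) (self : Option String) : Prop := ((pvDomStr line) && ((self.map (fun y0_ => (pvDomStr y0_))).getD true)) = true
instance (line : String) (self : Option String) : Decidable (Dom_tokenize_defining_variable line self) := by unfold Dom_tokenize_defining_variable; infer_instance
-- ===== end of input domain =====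

-- B is a two-phase decomposition (scan for the type keyword boundary, then split the
-- declaration on the first '='); B intentionally keeps later '=' characters in the
-- value where A deletes them (see D_ below). Neither program mutates its arguments.

-- ===== PORT A =====
-- A's single loop, state (data_type, name, value, found_eq), branches in A's order.
def tokStepA (st : List Char × List Char × List Char × Bool) (c : Char) :
    List Char × List Char × List Char × Bool :=
  let (dt, nm, vl, fe) := st
  if ¬ (dt ∈ [['i','n','t'], ['c','h','a','r','s'], ['f','l','o','a','t']]) then
    if c = ' ' then (dt, nm, vl, fe) else (dt ++ [c], nm, vl, fe)
  else if c = '=' then (dt, nm, vl, true)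
  else if fe then (dt, nm, vl ++ [c], fe)
  else if c ≠ ' ' then (dt, nm ++ [c], vl, fe)
  else (dt, nm, vl, fe)

def tokenize_defining_variable (line : String) (self : Option String) : String × String × String :=
  let r := line.toList.foldl tokStepA ([], [], [], false)
  (String.ofList r.1, String.ofList r.2.1, String.ofList r.2.2.1)

-- ===== PORT B =====
-- Phase 1 (the enumerate loop): accumulate non-space chars into data_type, breaking
-- at index j once data_type is a known type keyword; i = len(line) if never matched.
def tokScanB (dt : List Char) (j : Nat) : List Char → List Char × Nat
  | [] => (dt, j)
  | c :: cs =>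
    if dt ∈ [['i','n','t'], ['c','h','a','r','s'], ['f','l','o','a','t']] then (dt, j)
    else if c ≠ ' ' then tokScanB (dt ++ [c]) (j + 1) cs
    else tokScanB dt (j + 1) cs

def tokenize_defining_variable_alt (line : String) (self : Option String) : String × String × String :=
  let p := tokScanB [] 0 line.toList
  let rest := line.toList.drop p.2
  -- rest.partition('='): name before the first '=', value after it
  let name := rest.takeWhile (· ≠ '=')
  let value := (rest.dropWhile (· ≠ '=')).drop 1
  (String.ofList p.1, String.ofList (name.filter (· ≠ ' ')), String.ofList value)

-- ===== PRECONDITION & SPEC =====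
-- On lines whose declaration part after the recognised type keyword contains a
-- second equals sign after the first, A silently deletes every equals sign from the
-- value while B returns the text after the first equals sign verbatim, the intended
-- reading of the equals sign as a single assignment delimiter.
def D_tokenize_defining_variable (line : String) (self : Option String) : Prop :=
  ("int".toList <+: line.toList.filter (· ≠ ' ') ∨
   "chars".toList <+: line.toList.filter (· ≠ ' ') ∨
   "float".toList <+: line.toList.filter (· ≠ ' ')) ∧
  2 ≤ line.toList.count '='
instance (line : String) (self : Option String) : Decidable (D_tokenize_defining_variable line self) := by
  unfold D_tokenize_defining_variable; infer_instance

def Spec_tokenize_defining_variable (line : String) (self : Option String) (out : String × String × String) : Prop := ¬ D_tokenize_defining_variable line self → out = tokenize_defining_variable_alt line self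
instance (line : String) (self : Option String) (out : String × String × String) : Decidable (Spec_tokenize_defining_variable line self out) := by unfold Spec_tokenize_defining_variable; infer_instance

def pvDiffWitness_tokenize_defining_variable : String × Option String := ("int a=b=c", none)
def pvDiffWitnessOut_tokenize_defining_variable : (String × String × String) × (String × String × String) :=
  (("int", "a", "bc"), ("int", "a", "b=c"))

-- ===== CLAIM (what is proved, stated in full; the proofs are below) =====
def Claim_unchanged_tokenize_defining_variable : Prop := ∀ (line : String) (self : Option String), Dom_tokenize_defining_variable line self → Spec_tokenize_defining_variable line self (tokenize_defining_variable line self)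
def Claim_changed_tokenize_defining_variable : Prop := Dom_tokenize_defining_variable (pvDiffWitness_tokenize_defining_variable.1) (pvDiffWitness_tokenize_defining_variable.2) ∧ D_tokenize_defining_variable (pvDiffWitness_tokenize_defining_variable.1) (pvDiffWitness_tokenize_defining_variable.2) ∧ tokenize_defining_variable (pvDiffWitness_tokenize_defining_variable.1) (pvDiffWitness_tokenize_defining_variable.2) = pvDiffWitnessOut_tokenize_defining_variable.1 ∧ tokenize_defining_variable_alt (pvDiffWitness_tokenize_defining_variable.1) (pvDiffWitness_tokenize_defining_variable.2) = pvDiffWitnessOut_tokenize_defining_variable.2 ∧ pvDiffWitnessOut_tokenize_defining_variable.1 ≠ pvDiffWitnessOut_tokenize_defining_variable.2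
def Claim_exact_tokenize_defining_variable : Prop := ∀ (line : String) (self : Option String), Dom_tokenize_defining_variable line self → D_tokenize_defining_variable line self → tokenize_defining_variable line self ≠ tokenize_defining_variable_alt line self

-- ===== LEMMAS AND PROOFS =====

-- A recursive rendering of B's boundary scan that carries the remainder instead of
-- the index; used only by the proofs.
def tokFindB (dt : List Char) : List Char → List Char × List Char
  | [] => (dt, [])
  | c :: cs =>
    if dt ∈ [['i','n','t'], ['c','h','a','r','s'], ['f','l','o','a','t']] then (dt, c :: cs)
    else if c ≠ ' ' then tokFindB (dt ++ [c]) cs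
    else tokFindB dt cs

-- Step lemmas for the scans.
theorem tokFindB_match (dt : List Char) (c : Char) (cs : List Char)
    (h : dt ∈ [['i','n','t'], ['c','h','a','r','s'], ['f','l','o','a','t']]) :
    tokFindB dt (c :: cs) = (dt, c :: cs) := by
  simp only [tokFindB]
  rw [if_pos h]

theorem tokFindB_space (dt : List Char) (cs : List Char)
    (h : dt ∉ [['i','n','t'], ['c','h','a','r','s'], ['f','l','o','a','t']]) :
    tokFindB dt (' ' :: cs) = tokFindB dt cs := by
  simp only [tokFindB]
  rw [if_neg h, if_neg (by simp)]

theorem tokFindB_char (dt : List Char) (c : Char) (cs : List Char)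
    (h : dt ∉ [['i','n','t'], ['c','h','a','r','s'], ['f','l','o','a','t']]) (hc : c ≠ ' ') :
    tokFindB dt (c :: cs) = tokFindB (dt ++ [c]) cs := by
  simp only [tokFindB]
  rw [if_neg h, if_pos hc]

-- The index-carrying scan of the port agrees with the remainder-carrying scan.
theorem tokScanB_le (cs : List Char) (dt : List Char) (j : Nat) : j ≤ (tokScanB dt j cs).2 := by
  induction cs generalizing dt j with
  | nil => simp [tokScanB]
  | cons c cs ih =>
    by_cases h : dt ∈ [['i','n','t'], ['c','h','a','r','s'], ['f','l','o','a','t']]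
    · simp only [tokScanB]; rw [if_pos h]
    · by_cases hs : c = ' '
      · simp only [tokScanB]; rw [if_neg h, if_neg (by simp [hs])]
        exact le_trans (Nat.le_succ j) (ih dt (j + 1))
      · simp only [tokScanB]; rw [if_neg h, if_pos hs]
        exact le_trans (Nat.le_succ j) (ih (dt ++ [c]) (j + 1))

theorem tokScanB_eq (cs : List Char) (dt : List Char) (j : Nat) :
    (tokScanB dt j cs).1 = (tokFindB dt cs).1 ∧
    cs.drop ((tokScanB dt j cs).2 - j) = (tokFindB dt cs).2 := by
  induction cs generalizing dt j with
  | nil => simp [tokScanB, tokFindB]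
  | cons c cs ih =>
    by_cases h : dt ∈ [['i','n','t'], ['c','h','a','r','s'], ['f','l','o','a','t']]
    · rw [tokFindB_match _ _ _ h]
      simp only [tokScanB]; rw [if_pos h]
      simp
    · by_cases hs : c = ' '
      · subst hs
        rw [tokFindB_space _ _ h]
        simp only [tokScanB]; rw [if_neg h, if_neg (by simp)]
        have hle := tokScanB_le cs dt (j + 1)
        obtain ⟨h1, h2⟩ := ih dt (j + 1)
        refine ⟨h1, ?_⟩
        rw [← h2]
        have : (tokScanB dt (j + 1) cs).2 - j = ((tokScanB dt (j + 1) cs).2 - (j + 1)) + 1 := by omega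
        rw [this, List.drop_succ_cons]
      · rw [tokFindB_char _ _ _ h hs]
        simp only [tokScanB]; rw [if_neg h, if_pos hs]
        have hle := tokScanB_le cs (dt ++ [c]) (j + 1)
        obtain ⟨h1, h2⟩ := ih (dt ++ [c]) (j + 1)
        refine ⟨h1, ?_⟩
        rw [← h2]
        have : (tokScanB (dt ++ [c]) (j + 1) cs).2 - j = ((tokScanB (dt ++ [c]) (j + 1) cs).2 - (j + 1)) + 1 := by omega
        rw [this, List.drop_succ_cons]

-- B's port, rephrased through the remainder-carrying scan.
theorem alt_eq (line : String) (self : Option String) :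
    tokenize_defining_variable_alt line self =
      (String.ofList (tokFindB [] line.toList).1,
       String.ofList (((tokFindB [] line.toList).2.takeWhile (· ≠ '=')).filter (· ≠ ' ')),
       String.ofList (((tokFindB [] line.toList).2.dropWhile (· ≠ '=')).drop 1)) := by
  obtain ⟨h1, h2⟩ := tokScanB_eq line.toList [] 0
  unfold tokenize_defining_variable_alt
  simp only [Nat.sub_zero] at h2
  simp only [h1, h2]

-- A's loop after the type has matched, found_eq = true: value gets the non-'=' chars.
theorem tokPhase2_true (cs : List Char) (dt nm vl : List Char)
    (h : dt ∈ [['i','n','t'], ['c','h','a','r','s'], ['f','l','o','a','t']]) :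
    cs.foldl tokStepA (dt, nm, vl, true) = (dt, nm, vl ++ cs.filter (· ≠ '='), true) := by
  induction cs generalizing vl with
  | nil => simp
  | cons c cs ih =>
    by_cases hc : c = '='
    · simp [tokStepA, h, hc, ih]
    · simp [tokStepA, h, hc, ih, List.append_assoc]

-- A's loop after the type has matched, found_eq = false.
theorem tokPhase2_false (cs : List Char) (dt nm vl : List Char)
    (h : dt ∈ [['i','n','t'], ['c','h','a','r','s'], ['f','l','o','a','t']]) :
    cs.foldl tokStepA (dt, nm, vl, false) =
      (dt, nm ++ (cs.takeWhile (· ≠ '=')).filter (· ≠ ' '),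
       vl ++ (((cs.dropWhile (· ≠ '=')).drop 1).filter (· ≠ '=')), cs.any (· == '=')) := by
  induction cs generalizing nm with
  | nil => simp
  | cons c cs ih =>
    by_cases hc : c = '='
    · simp [tokStepA, h, hc, tokPhase2_true cs dt nm vl h]
    · by_cases hs : c = ' '
      · simp [tokStepA, h, hc, hs, ih]
      · simp [tokStepA, h, hc, hs, ih, List.append_assoc]

-- A's fold equals the boundary search followed by the phase-2 characterisation.
theorem tokPhase1 (cs : List Char) (dt : List Char) :
    cs.foldl tokStepA (dt, [], [], false) =
      ((tokFindB dt cs).1,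
       (((tokFindB dt cs).2.takeWhile (· ≠ '=')).filter (· ≠ ' ')),
       ((((tokFindB dt cs).2.dropWhile (· ≠ '=')).drop 1).filter (· ≠ '=')),
       (tokFindB dt cs).2.any (· == '=')) := by
  induction cs generalizing dt with
  | nil => simp [tokFindB]
  | cons c cs ih =>
    by_cases h : dt ∈ [['i','n','t'], ['c','h','a','r','s'], ['f','l','o','a','t']]
    · have := tokPhase2_false (c :: cs) dt [] [] h
      rw [tokFindB_match _ _ _ h]
      simpa using this
    · by_cases hs : c = ' '
      · subst hs
        rw [tokFindB_space _ _ h]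
        simpa [tokStepA, h] using ih dt
      · rw [tokFindB_char _ _ _ h hs]
        simpa [tokStepA, h, hs] using ih (dt ++ [c])

-- The remainder produced by tokFindB is either empty or the drop at a position where
-- the space-stripped prefix is a type keyword.
theorem tokFindB_rest (cs p : List Char) :
    (tokFindB (p.filter (· ≠ ' ')) cs).2 = [] ∨
    ∃ n ≤ (p ++ cs).length, (tokFindB (p.filter (· ≠ ' ')) cs).2 = (p ++ cs).drop n ∧
      ((p ++ cs).take n).filter (· ≠ ' ') ∈ [['i','n','t'], ['c','h','a','r','s'], ['f','l','o','a','t']] := by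
  induction cs generalizing p with
  | nil => left; simp [tokFindB]
  | cons c cs ih =>
    by_cases h : p.filter (· ≠ ' ') ∈ [['i','n','t'], ['c','h','a','r','s'], ['f','l','o','a','t']]
    · right
      rw [tokFindB_match _ _ _ h]
      exact ⟨p.length, by simp, by simp, by simpa using h⟩
    · by_cases hs : c = ' '
      · subst hs
        rw [tokFindB_space _ _ h]
        have := ih (p ++ [' '])
        simp only [List.filter_append, List.filter_cons, List.filter_nil] at this
        rw [if_neg (by simp)] at this
        simpa [List.append_assoc] using this
      · rw [tokFindB_char _ _ _ h hs]
        have := ih (p ++ [c])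
        simp only [List.filter_append, List.filter_cons, List.filter_nil] at this
        rw [if_pos (by simpa using hs)] at this
        simpa [List.append_assoc] using this

-- A proper prefix of a type keyword is not itself a type keyword.
theorem proper_prefix_not_type (t dt : List Char)
    (ht : t ∈ [['i','n','t'], ['c','h','a','r','s'], ['f','l','o','a','t']])
    (hp : dt <+: t) (hne : dt ≠ t) :
    dt ∉ [['i','n','t'], ['c','h','a','r','s'], ['f','l','o','a','t']] := by
  intro hdt
  simp only [List.mem_cons, List.not_mem_nil, or_false] at ht hdt
  rcases ht with rfl | rfl | rfl <;> rcases hdt with rfl | rfl | rfl <;>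
    first
      | exact hne rfl
      | exact absurd hp (by decide)

-- If a type keyword is a prefix of the space-stripped input, the scan stops exactly
-- when it has consumed that keyword (plus interleaved spaces).
theorem tokFindB_stop (cs : List Char) (t : List Char) (dt : List Char)
    (ht : t ∈ [['i','n','t'], ['c','h','a','r','s'], ['f','l','o','a','t']])
    (hne : dt ≠ t) (hp : dt <+: t) (hpre : t <+: dt ++ cs.filter (· ≠ ' ')) :
    ∃ n, (tokFindB dt cs).2 = cs.drop n ∧ dt ++ (cs.take n).filter (· ≠ ' ') = t := by
  induction cs generalizing dt with
  | nil =>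
    exfalso
    simp only [List.filter_nil, List.append_nil] at hpre
    have h1 := hp.length_le
    have h2 := hpre.length_le
    exact hne (List.IsPrefix.eq_of_length hp (le_antisymm h1 h2))
  | cons c cs ih =>
    have hnotT := proper_prefix_not_type t dt ht hp hne
    obtain ⟨u, hu⟩ := hp
    have hu' : u ≠ [] := by rintro rfl; exact hne (by simpa using hu)
    by_cases hs : c = ' '
    · subst hs
      rw [tokFindB_space _ _ hnotT]
      have hpre' : t <+: dt ++ cs.filter (· ≠ ' ') := by
        simpa using hpre
      obtain ⟨n, h1, h2⟩ := ih dt hne ⟨u, hu⟩ hpre'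
      refine ⟨n + 1, by simpa using h1, ?_⟩
      simpa using h2
    · -- the next non-space char must be the next char of t
      have hpre2 : u <+: c :: cs.filter (· ≠ ' ') := by
        rw [← hu] at hpre
        have : dt ++ u <+: dt ++ (c :: cs.filter (· ≠ ' ')) := by
          simpa [hs] using hpre
        exact (List.prefix_append_right_inj dt).mp this
      obtain ⟨u', rfl⟩ : ∃ u', u = c :: u' := by
        cases u with
        | nil => exact absurd rfl hu'
        | cons v u' =>
          obtain ⟨rfl, -⟩ := List.cons_prefix_cons.mp hpre2
          exact ⟨u', rfl⟩
      rw [tokFindB_char _ _ _ hnotT hs]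
      by_cases hEnd : dt ++ [c] = t
      · refine ⟨1, ?_, ?_⟩
        · cases cs with
          | nil => simp [tokFindB]
          | cons d ds => rw [tokFindB_match _ _ _ (hEnd ▸ ht)]; simp
        · simpa [hs] using hEnd
      · have hp' : dt ++ [c] <+: t := by
          rw [← hu]; exact ⟨u', by simp⟩
        have hpre' : t <+: (dt ++ [c]) ++ cs.filter (· ≠ ' ') := by
          have h5 : (dt ++ [c]) ++ cs.filter (· ≠ ' ') = dt ++ (c :: cs.filter (· ≠ ' ')) := by simp
          rw [← hu, h5]
          exact (List.prefix_append_right_inj dt).mpr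
            (List.cons_prefix_cons.mpr ⟨rfl, (List.cons_prefix_cons.mp hpre2).2⟩)
        obtain ⟨n, h1, h2⟩ := ih (dt ++ [c]) hEnd hp' hpre'
        refine ⟨n + 1, by simpa using h1, ?_⟩
        simp only [List.take_succ_cons, List.filter_cons]
        rw [if_pos (by simpa using hs)]
        simpa [List.append_assoc] using h2

-- If the value part still contains '=', the remainder held at least two '='.
theorem twoEq_of_mem (l : List Char) (h : '=' ∈ (l.dropWhile (· ≠ '=')).drop 1) :
    2 ≤ l.count '=' := by
  induction l with
  | nil => simp at h
  | cons c cs ih =>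
    by_cases hc : c = '='
    · subst hc
      simp only [List.dropWhile_cons] at h
      rw [if_neg (by simp)] at h
      simp only [List.drop_succ_cons, List.drop_zero] at h
      have := List.one_le_count_iff.mpr h
      rw [List.count_cons_self]; omega
    · simp only [List.dropWhile_cons] at h
      rw [if_pos (by simpa using hc)] at h
      rw [List.count_cons_of_ne hc]
      exact ih h

-- Conversely, two '=' in the remainder put one '=' into B's value part.
theorem mem_of_twoEq (l : List Char) (h : 2 ≤ l.count '=') :
    '=' ∈ (l.dropWhile (· ≠ '=')).drop 1 := by
  induction l with
  | nil => simp at h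
  | cons c cs ih =>
    by_cases hc : c = '='
    · subst hc
      simp only [List.dropWhile_cons]
      rw [if_neg (by simp)]
      simp only [List.drop_succ_cons, List.drop_zero]
      rw [List.count_cons_self] at h
      exact List.one_le_count_iff.mp (by omega)
    · simp only [List.dropWhile_cons]
      rw [if_pos (by simpa using hc)]
      apply ih
      rwa [List.count_cons_of_ne hc] at h

-- Spaces do not affect the number of '=' in a list.
theorem count_eq_count_filter (l : List Char) :
    l.count '=' = (l.filter (· ≠ ' ')).count '=' := by
  induction l with
  | nil => simp
  | cons c cs ih =>
    by_cases hsp : c = ' '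
    · subst hsp
      rw [List.count_cons_of_ne (by decide), List.filter_cons, if_neg (by simp)]
      exact ih
    · rw [List.filter_cons, if_pos (by simpa using hsp)]
      by_cases hc : c = '='
      · subst hc
        rw [List.count_cons_self, List.count_cons_self, ih]
      · rw [List.count_cons_of_ne hc, List.count_cons_of_ne hc]
        exact ih

-- Splitting a count at a take/drop boundary.
theorem count_take_drop (l : List Char) (n : Nat) (x : Char) :
    l.count x = (l.take n).count x + (l.drop n).count x := by
  rw [← List.count_append, List.take_append_drop]

-- Inside D_, the remainder at the scan's stopping point still carries both '='.
theorem count_rest_ge (l : List Char) (t : List Char)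
    (ht : t ∈ [['i','n','t'], ['c','h','a','r','s'], ['f','l','o','a','t']])
    (htEq : t.count '=' = 0)
    (hp : t <+: l.filter (· ≠ ' ')) (hcnt : 2 ≤ l.count '=') :
    2 ≤ (tokFindB [] l).2.count '=' := by
  have hne : ([] : List Char) ≠ t := by
    rintro rfl; revert ht; decide
  obtain ⟨n, h1, h2⟩ := tokFindB_stop l t [] ht hne (List.nil_prefix) (by simpa using hp)
  simp only [List.nil_append] at h2
  have h3 : (l.take n).count '=' = 0 := by
    rw [count_eq_count_filter, h2, htEq]
  have h4 := count_take_drop l n '='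
  rw [h1]
  omega

-- ===== VERDICT (by name: the statements are the Claim_ definitions above) =====
theorem tokenize_defining_variable_spec : Claim_unchanged_tokenize_defining_variable := by
  intro line self _ hD
  have hval : '=' ∉ ((tokFindB [] line.toList).2.dropWhile (· ≠ '=')).drop 1 := by
    intro hmem
    apply hD
    rcases tokFindB_rest line.toList [] with he | ⟨n, hn, heq, ht⟩
    · simp only [List.filter_nil] at he
      rw [he] at hmem; simp at hmem
    · simp only [List.filter_nil, List.nil_append] at heq ht hn
      have h2 : 2 ≤ (tokFindB [] line.toList).2.count '=' := twoEq_of_mem _ hmem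
      rw [heq] at h2
      constructor
      · have hpref : (line.toList.take n).filter (· ≠ ' ') <+: line.toList.filter (· ≠ ' ') := by
          refine ⟨(line.toList.drop n).filter (· ≠ ' '), ?_⟩
          rw [← List.filter_append, List.take_append_drop]
        simp only [List.mem_cons, List.not_mem_nil, or_false] at ht
        rcases ht with h | h | h
        · left; rw [show ("int".toList) = ['i','n','t'] by decide, ← h]; exact hpref
        · right; left; rw [show ("chars".toList) = ['c','h','a','r','s'] by decide, ← h]; exact hpref
        · right; right; rw [show ("float".toList) = ['f','l','o','a','t'] by decide, ← h]; exact hpref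
      · have := count_take_drop line.toList n '='
        omega
  have h3 : (((tokFindB [] line.toList).2.dropWhile (· ≠ '=')).drop 1).filter (· ≠ '=') =
      ((tokFindB [] line.toList).2.dropWhile (· ≠ '=')).drop 1 := by
    apply List.filter_eq_self.mpr
    intro a ha
    simp only [ne_eq, decide_eq_true_eq]
    exact fun e => hval (e ▸ ha)
  rw [alt_eq]
  unfold tokenize_defining_variable
  rw [tokPhase1 line.toList []]
  simp only
  rw [h3]

theorem tokenize_defining_variable_changed : Claim_changed_tokenize_defining_variable := by
  unfold Claim_changed_tokenize_defining_variable; decide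

theorem tokenize_defining_variable_tight : Claim_exact_tokenize_defining_variable := by
  intro line self _ hD heq
  obtain ⟨hpre, hcnt⟩ := hD
  have h2 : 2 ≤ (tokFindB [] line.toList).2.count '=' := by
    rcases hpre with h | h | h
    · exact count_rest_ge _ _ (by decide) (by decide) h hcnt
    · exact count_rest_ge _ _ (by decide) (by decide) h hcnt
    · exact count_rest_ge _ _ (by decide) (by decide) h hcnt
  have hmem : '=' ∈ ((tokFindB [] line.toList).2.dropWhile (· ≠ '=')).drop 1 :=
    mem_of_twoEq _ h2
  rw [alt_eq] at heq
  have hA := congrArg (fun t => t.2.2) heq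
  unfold tokenize_defining_variable at hA
  rw [tokPhase1 line.toList []] at hA
  simp only at hA
  have hl := congrArg String.toList hA
  simp only [String.toList_ofList] at hl
  rw [← hl] at hmem
  simp at hmem
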